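-- pv_equiv track=rewrite | github.com/PeerInfinity/Archipelago-CC | scripts/Context.py | extract_block_comments
-- ===== SOURCE A (Python) =====
-- def extract_block_comments(content):
--     """
--     Extract content from /* */ style block comments and return both
--     the content without block comments and the content from within block comments.
--     Returns tuple: (content_without_comments, commented_content_lines)
--     """
--     result = []
--     commented_lines = []
--     i = 0
--     while i < len(content):
--         if i < len(content) - 1 and content[i:i+2] == '/*':
--             # Found start of block comment, find the end
--             end_pos = content.find('*/', i + 2)
--             if end_pos != -1:
--                 # Extract the commented content
--                 comment_content = content[i+2:end_pos]
--                 commented_lines.extend(comment_content.splitlines())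
--                 # Skip to after the closing */
--                 i = end_pos + 2
--             else:
--                 # No closing */, extract rest as commented content
--                 comment_content = content[i+2:]
--                 commented_lines.extend(comment_content.splitlines())
--                 break
--         else:
--             result.append(content[i])
--             i += 1
--     return ''.join(result), commented_lines
-- ===== SOURCE B (Python) =====
-- def extract_block_comments(content):
--     """Chunk-jumping rewrite: hop between '/*' and '*/' with find instead of
--     scanning character by character."""
--     code_parts = []
--     commented_lines = []
--     pos = 0
--     while True:
--         start = content.find('/*', pos)
--         if start == -1:
--             code_parts.append(content[pos:])
--             break
--         code_parts.append(content[pos:start])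
--         end = content.find('*/', start + 2)
--         if end == -1:
--             commented_lines.extend(content[start + 2:].splitlines())
--             break
--         commented_lines.extend(content[start + 2:end].splitlines())
--         pos = end + 2
--     return ''.join(code_parts), commented_lines
-- ===== Notes on version B (the rewrite author's own statement) =====
-- stated objective: faster
-- what changed: A scans the string character by character, testing a two-char slice at every position and appending chars one at a time; B jumps directly between '/*' and '*/' occurrences with str.find and appends whole slices, so the per-character inner work disappears.
import Mathlib
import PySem

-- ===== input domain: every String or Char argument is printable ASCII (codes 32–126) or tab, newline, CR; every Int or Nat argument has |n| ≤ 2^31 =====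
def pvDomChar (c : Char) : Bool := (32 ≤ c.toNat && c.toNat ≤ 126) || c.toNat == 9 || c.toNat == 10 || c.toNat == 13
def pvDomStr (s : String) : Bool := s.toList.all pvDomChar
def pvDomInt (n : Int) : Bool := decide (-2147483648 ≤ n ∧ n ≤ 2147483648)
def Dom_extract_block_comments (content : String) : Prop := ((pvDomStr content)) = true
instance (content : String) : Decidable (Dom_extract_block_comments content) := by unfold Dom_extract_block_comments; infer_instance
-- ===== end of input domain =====

-- B replaces A's character-by-character scan by a chunk-jumping loop that hops
-- between '/*' and '*/' occurrences with find and appends whole slices (objective: faster, constant-factor).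

-- termination helpers for the ports (cited in decreasing_by)
theorem pvFindGo_ge (sub : List Char) (t : List Char) : ∀ (k : Nat),
    PySem.Chars.find.go sub t k = -1 ∨ (k : Int) ≤ PySem.Chars.find.go sub t k := by
  induction t with
  | nil =>
    intro k
    simp only [PySem.Chars.find.go]
    split_ifs <;> simp
  | cons c t ih =>
    intro k
    simp only [PySem.Chars.find.go]
    split_ifs with h
    · right; simp
    · rcases ih (k + 1) with h' | h'
      · left; exact h'
      · right; omega

theorem pvFindGo_lt (sub : List Char) (hsub : sub ≠ []) (t : List Char) : ∀ (k : Nat),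
    PySem.Chars.find.go sub t k = -1 ∨ PySem.Chars.find.go sub t k < (k : Int) + t.length := by
  induction t with
  | nil =>
    intro k
    simp only [PySem.Chars.find.go]
    have : sub.isEmpty = false := by simpa [List.isEmpty_iff] using hsub
    simp [this]
  | cons c t ih =>
    intro k
    simp only [PySem.Chars.find.go]
    split_ifs with h
    · right
      push_cast [List.length_cons]
      omega
    · rcases ih (k + 1) with h' | h'
      · left; exact h'
      · right
        push_cast [List.length_cons]
        push_cast at h'
        omega

theorem pvFind_ge (s sub : List Char) :
    PySem.Chars.find s sub = -1 ∨ 0 ≤ PySem.Chars.find s sub := by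
  simpa using pvFindGo_ge sub s 0

theorem pvFindFrom_ge (cs sub : List Char) (st : Int) (h0 : 0 ≤ st)
    (h : PySem.Chars.findFrom cs sub st ≠ -1) :
    st ≤ PySem.Chars.findFrom cs sub st := by
  simp only [PySem.Chars.findFrom] at h ⊢
  have hst : ¬ st < 0 := by omega
  simp only [if_neg hst] at h ⊢
  split_ifs at h ⊢ with h1 h2
  · exact absurd rfl h
  · exact absurd rfl h
  · rcases pvFind_ge (List.drop st.toNat (List.take ((cs.length:Int)).toNat cs)) sub with hf | hf
    · exact absurd hf h2
    · omega

theorem pvFindFrom_lt (cs sub : List Char) (hsub : sub ≠ []) (st : Int) (h0 : 0 ≤ st)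
    (h : PySem.Chars.findFrom cs sub st ≠ -1) :
    PySem.Chars.findFrom cs sub st < cs.length := by
  simp only [PySem.Chars.findFrom] at h ⊢
  have hst : ¬ st < 0 := by omega
  simp only [if_neg hst] at h ⊢
  split_ifs at h ⊢ with h1 h2
  · exact absurd rfl h
  · exact absurd rfl h
  · set t := List.drop st.toNat (List.take ((cs.length:Int)).toNat cs) with ht
    rcases pvFindGo_lt sub hsub t 0 with hf | hf
    · exact absurd (by simpa [PySem.Chars.find] using hf) h2
    · have hlen : (t.length : Int) ≤ (cs.length : Int) - st := by
        simp [ht, List.length_drop]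
        omega
      have : PySem.Chars.find t sub < (0:Int) + t.length := by simpa [PySem.Chars.find] using hf
      simp only [Int.toNat_natCast] at *
      omega

-- ===== PORT A =====
-- literal port of A's index loop: result/commented_lines accumulators, char appended one at a time
def pvLoopA (cs : List Char) (i : Nat) (result : List Char) (comm : List String) :
    List Char × List String :=
  if h : i < cs.length then
    if hc : (i : Int) < (cs.length : Int) - 1 ∧
        PySem.List.slice cs (some (i : Int)) (some ((i : Int) + 2)) = ['/', '*'] then
      let endPos := PySem.Chars.findFrom cs ['*', '/'] ((i : Int) + 2)
      if he : endPos ≠ -1 then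
        pvLoopA cs (endPos.toNat + 2) result
          (comm ++ (PySem.Chars.splitlines
            (PySem.List.slice cs (some ((i : Int) + 2)) (some endPos))).map String.ofList)
      else
        (result, comm ++ (PySem.Chars.splitlines
            (PySem.List.slice cs (some ((i : Int) + 2)) none)).map String.ofList)
    else
      pvLoopA cs (i + 1) (result ++ [cs[i]]) comm
  else
    (result, comm)
termination_by cs.length - i
decreasing_by
  · have h2 : (i : Int) + 2 = ((i + 2 : Nat) : Int) := by push_cast; ring
    have hge := pvFindFrom_ge cs ['*', '/'] ((i : Int) + 2) (by omega) he
    have : (i : Int) + 2 ≤ endPos := hge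
    have : i + 2 ≤ endPos.toNat := by omega
    omega
  · omega

def extract_block_comments (content : String) : String × List String :=
  let cs := content.toList
  let r := pvLoopA cs 0 [] []
  (String.ofList r.1, r.2)

-- ===== PORT B =====
-- literal port of B's chunk loop: jump between find('/*') and find('*/'), append whole slices
def pvLoopB (cs : List Char) (pos : Nat) (parts : List (List Char)) (comm : List String) :
    List (List Char) × List String :=
  let start := PySem.Chars.findFrom cs ['/', '*'] (pos : Int)
  if hs : start = -1 then
    (parts ++ [PySem.List.slice cs (some (pos : Int)) none], comm)
  else
    let parts' := parts ++ [PySem.List.slice cs (some (pos : Int)) (some start)]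
    let e := PySem.Chars.findFrom cs ['*', '/'] (start + 2)
    if he : e = -1 then
      (parts', comm ++ (PySem.Chars.splitlines
          (PySem.List.slice cs (some (start + 2)) none)).map String.ofList)
    else
      pvLoopB cs (e.toNat + 2) parts'
        (comm ++ (PySem.Chars.splitlines
          (PySem.List.slice cs (some (start + 2)) (some e))).map String.ofList)
termination_by cs.length + 2 - pos
decreasing_by
  have hgs := pvFindFrom_ge cs ['/', '*'] (pos : Int) (by positivity) hs
  have hge := pvFindFrom_ge cs ['*', '/'] (start + 2) (by omega) he
  have hlt := pvFindFrom_lt cs ['*', '/'] (by simp) (start + 2) (by omega) he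
  have h1 : (pos : Int) + 2 ≤ e := by omega
  have h2 : e < (cs.length : Int) := hlt
  have h3 : pos + 2 ≤ e.toNat := by omega
  have h4 : e.toNat < cs.length := by omega
  simp only [e, start] at h3 h4
  omega

def extract_block_comments_alt (content : String) : String × List String :=
  let cs := content.toList
  let r := pvLoopB cs 0 [] []
  (String.ofList (PySem.Chars.join [] r.1), r.2)

-- ===== PRECONDITION & SPEC =====
def Spec_extract_block_comments (content : String) (out : String × List String) : Prop := out = extract_block_comments_alt content
instance (content : String) (out : String × List String) : Decidable (Spec_extract_block_comments content out) := by unfold Spec_extract_block_comments; infer_instance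

-- ===== CLAIM (what is proved, stated in full; the proofs are below) =====
def Claim_equal_extract_block_comments : Prop := ∀ (content : String), Dom_extract_block_comments content → Spec_extract_block_comments content (extract_block_comments content)

-- ===== LEMMAS AND PROOFS =====

theorem pvJoin_nil_flatten (ps : List (List Char)) :
    PySem.Chars.join [] ps = ps.flatten := by
  induction ps with
  | nil => simp [PySem.Chars.join_nil]
  | cons p rest ih =>
    cases rest with
    | nil => simp [PySem.Chars.join_singleton]
    | cons q r => simp [PySem.Chars.join_cons_cons, ih]

theorem pvFindGo_shift (sub t : List Char) : ∀ (k : Nat),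
    PySem.Chars.find.go sub t k =
      if PySem.Chars.find.go sub t 0 = -1 then -1
      else (k : Int) + PySem.Chars.find.go sub t 0 := by
  induction t with
  | nil =>
    intro k
    simp only [PySem.Chars.find.go]
    split_ifs <;> simp_all
  | cons c t ih =>
    intro k
    by_cases h : sub.isPrefixOf (c :: t)
    · have hk : ∀ m : Nat, PySem.Chars.find.go sub (c :: t) m = m := by
        intro m; simp only [PySem.Chars.find.go]; simp [h]
      rw [hk k, hk 0]
      norm_num
    · have hk : ∀ m : Nat, PySem.Chars.find.go sub (c :: t) m = PySem.Chars.find.go sub t (m + 1) := by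
        intro m; simp only [PySem.Chars.find.go]; simp [h]
      rw [hk k, hk 0, ih (k + 1), Nat.zero_add, ih 1]
      by_cases h' : PySem.Chars.find.go sub t 0 = -1
      · simp [h']
      · have h1 : (1 : Int) + PySem.Chars.find.go sub t 0 ≠ -1 := by
          rcases pvFindGo_ge sub t 0 with h0 | h0
          · exact absurd h0 h'
          · omega
        simp only [if_neg h']
        push_cast
        rw [if_neg h1]
        ring

theorem pvFind_cons (sub : List Char) (hsub : sub ≠ []) (c : Char) (t : List Char) :
    PySem.Chars.find (c :: t) sub =
      if sub.isPrefixOf (c :: t) then 0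
      else if PySem.Chars.find t sub = -1 then -1 else 1 + PySem.Chars.find t sub := by
  by_cases h : sub.isPrefixOf (c :: t)
  · have e1 : PySem.Chars.find (c :: t) sub = 0 := by
      simp only [PySem.Chars.find, PySem.Chars.find.go]
      simp [h]
    rw [e1, if_pos h]
  · have e1 : PySem.Chars.find (c :: t) sub = PySem.Chars.find.go sub t 1 := by
      simp only [PySem.Chars.find, PySem.Chars.find.go]
      simp [h]
    rw [e1, pvFindGo_shift sub t 1, if_neg h]
    simp only [PySem.Chars.find]
    norm_num

theorem pvFindFrom_oob (cs sub : List Char) (hsub : sub ≠ []) (i : Nat) (hi : cs.length ≤ i) :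
    PySem.Chars.findFrom cs sub (i : Int) = -1 := by
  simp only [PySem.Chars.findFrom]
  have h0 : ¬ (i : Int) < 0 := by omega
  simp only [if_neg h0]
  by_cases h1 : (cs.length : Int) < (i : Int)
  · rw [if_pos h1]
  · rw [if_neg h1]
    have hdrop : List.drop ((i : Int)).toNat (List.take ((cs.length : Int)).toNat cs) = [] := by
      apply List.drop_eq_nil_of_le
      simp only [List.length_take, Int.toNat_natCast]
      omega
    rw [hdrop]
    have hemp : sub.isEmpty = false := by simpa [List.isEmpty_iff] using hsub
    simp [PySem.Chars.find, PySem.Chars.find.go, hemp]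

theorem pvFindFrom_succ (cs sub : List Char) (hsub : sub ≠ []) (i : Nat) (hi : i < cs.length)
    (hnp : ¬ sub.isPrefixOf (cs.drop i)) :
    PySem.Chars.findFrom cs sub (i : Int) = PySem.Chars.findFrom cs sub ((i : Int) + 1) := by
  have hcast : (i : Int) + 1 = ((i + 1 : Nat) : Int) := by push_cast; ring
  rw [hcast, PySem.Chars.findFrom_natCast cs sub i (by omega),
    PySem.Chars.findFrom_natCast cs sub (i + 1) (by omega)]
  have hdrop : List.drop i cs = cs[i] :: List.drop (i + 1) cs := List.drop_eq_getElem_cons hi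
  have hF : PySem.Chars.find (List.drop i cs) sub =
      if PySem.Chars.find (List.drop (i + 1) cs) sub = -1 then -1
      else 1 + PySem.Chars.find (List.drop (i + 1) cs) sub := by
    rw [hdrop, pvFind_cons sub hsub cs[i] (List.drop (i + 1) cs),
      if_neg (by rw [← hdrop]; exact hnp)]
  rw [hF]
  by_cases hf : PySem.Chars.find (List.drop (i + 1) cs) sub = -1
  · simp [hf]
  · have h0 : (0 : Int) ≤ PySem.Chars.find (List.drop (i + 1) cs) sub := by
      rcases pvFind_ge (List.drop (i + 1) cs) sub with h | h
      · exact absurd h hf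
      · exact h
    rw [if_neg hf, if_neg (by omega : ¬ (1 : Int) + PySem.Chars.find (List.drop (i + 1) cs) sub = -1),
      if_neg hf]
    push_cast
    ring

theorem pvLoopB_acc (cs : List Char) : ∀ (pos : Nat) (parts : List (List Char)) (comm : List String),
    pvLoopB cs pos parts comm =
      (parts ++ (pvLoopB cs pos [] []).1, comm ++ (pvLoopB cs pos [] []).2) := by
  suffices H : ∀ (m pos : Nat), cs.length + 2 - pos ≤ m →
      ∀ (parts : List (List Char)) (comm : List String),
      pvLoopB cs pos parts comm =
        (parts ++ (pvLoopB cs pos [] []).1, comm ++ (pvLoopB cs pos [] []).2) by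
    intro pos parts comm
    exact H _ pos le_rfl parts comm
  intro m
  induction m with
  | zero =>
    intro pos hm parts comm
    have hs : PySem.Chars.findFrom cs ['/', '*'] (pos : Int) = -1 :=
      pvFindFrom_oob cs _ (by simp) pos (by omega)
    rw [pvLoopB.eq_def]
    conv_rhs => rw [pvLoopB.eq_def]
    dsimp only
    rw [dif_pos hs, dif_pos hs]
    simp
  | succ m ih =>
    intro pos hm parts comm
    rw [pvLoopB.eq_def]
    conv_rhs => rw [pvLoopB.eq_def]
    dsimp only
    split_ifs with hs he
    · simp
    · simp
    · -- recursive branch: both sides step to pos' with their accumulators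
      have hgs := pvFindFrom_ge cs ['/', '*'] (pos : Int) (by omega) hs
      have hge := pvFindFrom_ge cs ['*', '/']
        (PySem.Chars.findFrom cs ['/', '*'] (pos : Int) + 2) (by omega) he
      have hlt := pvFindFrom_lt cs ['*', '/'] (by simp)
        (PySem.Chars.findFrom cs ['/', '*'] (pos : Int) + 2) (by omega) he
      set e := PySem.Chars.findFrom cs ['*', '/']
        (PySem.Chars.findFrom cs ['/', '*'] (pos : Int) + 2) with hedef
      have hm' : cs.length + 2 - (e.toNat + 2) ≤ m := by omega
      conv_lhs => rw [ih (e.toNat + 2) hm']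
      conv_rhs => rw [ih (e.toNat + 2) hm']
      simp

theorem pvSliceCons (cs : List Char) (i : Nat) (hi : i < cs.length) (s1 : Int)
    (h1 : (i : Int) + 1 ≤ s1) :
    PySem.List.slice cs (some (i : Int)) (some s1) =
      cs[i] :: PySem.List.slice cs (some ((i : Int) + 1)) (some s1) := by
  have hc : (i : Int) + 1 = ((i + 1 : Nat) : Int) := by push_cast; ring
  rw [hc, PySem.List.slice_toNat cs (by omega) (by omega),
    PySem.List.slice_toNat cs (by omega) (by omega)]
  simp only [Int.toNat_natCast]
  rw [List.drop_eq_getElem_cons hi]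
  have h2 : s1.toNat - i = (s1.toNat - (i + 1)) + 1 := by omega
  rw [h2, List.take_succ_cons]

theorem pvBbase (cs : List Char) (i : Nat) (hi : cs.length ≤ i) :
    pvLoopB cs i [] [] = ([[]], []) := by
  have hs : PySem.Chars.findFrom cs ['/', '*'] (i : Int) = -1 :=
    pvFindFrom_oob cs _ (by simp) i hi
  rw [pvLoopB.eq_def]
  dsimp only
  rw [dif_pos hs, PySem.List.slice_from_natCast, List.drop_eq_nil_of_le hi]
  simp

theorem pvPrefix_iff (cs : List Char) (i : Nat) (hi : i < cs.length) :
    ((i : Int) < (cs.length : Int) - 1 ∧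
        PySem.List.slice cs (some (i : Int)) (some ((i : Int) + 2)) = ['/', '*']) ↔
      List.isPrefixOf ['/', '*'] (cs.drop i) := by
  have hc : (i : Int) + 2 = ((i + 2 : Nat) : Int) := by push_cast; ring
  rw [hc, PySem.List.slice_natCast cs i (i + 2), List.isPrefixOf_iff_prefix]
  constructor
  · rintro ⟨h1, h2⟩
    rw [List.prefix_iff_eq_take]
    simp only [List.length_cons, List.length_nil]
    have : i + 2 - i = 2 := by omega
    rw [this] at h2
    exact h2.symm
  · intro h
    have hl := h.length_le
    simp only [List.length_drop, List.length_cons, List.length_nil] at hl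
    have h2 : i + 2 - i = 2 := by omega
    rw [h2]
    refine ⟨by omega, ?_⟩
    rw [List.prefix_iff_eq_take] at h
    exact h.symm

theorem pvBstep (cs : List Char) (i : Nat) (hi : i < cs.length)
    (hnp : ¬ List.isPrefixOf ['/', '*'] (cs.drop i)) :
    (pvLoopB cs i [] []).1.flatten = cs[i] :: (pvLoopB cs (i + 1) [] []).1.flatten ∧
      (pvLoopB cs i [] []).2 = (pvLoopB cs (i + 1) [] []).2 := by
  have hcast : ((i + 1 : Nat) : Int) = (i : Int) + 1 := by push_cast; ring
  have hstep : PySem.Chars.findFrom cs ['/', '*'] (i : Int) =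
      PySem.Chars.findFrom cs ['/', '*'] ((i + 1 : Nat) : Int) := by
    rw [hcast]; exact pvFindFrom_succ cs _ (by simp) i hi hnp
  have hd : List.drop i cs = cs[i] :: List.drop (i + 1) cs := List.drop_eq_getElem_cons hi
  by_cases hs : PySem.Chars.findFrom cs ['/', '*'] ((i + 1 : Nat) : Int) = -1
  · have hBi : pvLoopB cs i [] [] = ([List.drop i cs], []) := by
      rw [pvLoopB.eq_def]
      dsimp only
      rw [dif_pos (hstep.trans hs), PySem.List.slice_from_natCast]
      simp
    have hBi1 : pvLoopB cs (i + 1) [] [] = ([List.drop (i + 1) cs], []) := by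
      rw [pvLoopB.eq_def]
      dsimp only
      rw [dif_pos hs, PySem.List.slice_from_natCast]
      simp
    rw [hBi, hBi1]
    refine ⟨?_, rfl⟩
    simp only [List.flatten_cons, List.flatten_nil, List.append_nil]
    exact hd
  · have hge : ((i + 1 : Nat) : Int) ≤ PySem.Chars.findFrom cs ['/', '*'] ((i + 1 : Nat) : Int) :=
      pvFindFrom_ge cs _ _ (by omega) hs
    set s1 := PySem.Chars.findFrom cs ['/', '*'] ((i + 1 : Nat) : Int) with hs1
    have hchunk : PySem.List.slice cs (some (i : Int)) (some s1) =
        cs[i] :: PySem.List.slice cs (some ((i + 1 : Nat) : Int)) (some s1) := by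
      rw [hcast]
      exact pvSliceCons cs i hi s1 (by omega)
    by_cases he : PySem.Chars.findFrom cs ['*', '/'] (s1 + 2) = -1
    · have hBi : pvLoopB cs i [] [] = ([PySem.List.slice cs (some (i : Int)) (some s1)],
          (PySem.Chars.splitlines (PySem.List.slice cs (some (s1 + 2)))).map String.ofList) := by
        rw [pvLoopB.eq_def]
        dsimp only
        simp only [hstep, ← hs1]
        rw [dif_neg hs, dif_pos he]
        simp
      have hBi1 : pvLoopB cs (i + 1) [] [] =
          ([PySem.List.slice cs (some ((i + 1 : Nat) : Int)) (some s1)],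
          (PySem.Chars.splitlines (PySem.List.slice cs (some (s1 + 2)))).map String.ofList) := by
        rw [pvLoopB.eq_def]
        dsimp only
        simp only [hstep, ← hs1]
        rw [dif_neg hs, dif_pos he]
        simp
      rw [hBi, hBi1]
      simp [hchunk]
    · have hBi : pvLoopB cs i [] [] =
          pvLoopB cs ((PySem.Chars.findFrom cs ['*', '/'] (s1 + 2)).toNat + 2)
            [PySem.List.slice cs (some (i : Int)) (some s1)]
            ((PySem.Chars.splitlines (PySem.List.slice cs (some (s1 + 2)) (some
              (PySem.Chars.findFrom cs ['*', '/'] (s1 + 2))))).map String.ofList) := by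
        conv_lhs => rw [pvLoopB.eq_def]
        dsimp only
        simp only [hstep, ← hs1]
        rw [dif_neg hs, dif_neg he]
        simp
      have hBi1 : pvLoopB cs (i + 1) [] [] =
          pvLoopB cs ((PySem.Chars.findFrom cs ['*', '/'] (s1 + 2)).toNat + 2)
            [PySem.List.slice cs (some ((i + 1 : Nat) : Int)) (some s1)]
            ((PySem.Chars.splitlines (PySem.List.slice cs (some (s1 + 2)) (some
              (PySem.Chars.findFrom cs ['*', '/'] (s1 + 2))))).map String.ofList) := by
        conv_lhs => rw [pvLoopB.eq_def]
        dsimp only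
        simp only [hstep, ← hs1]
        rw [dif_neg hs, dif_neg he]
        simp
      rw [hBi, hBi1,
        pvLoopB_acc cs _ [PySem.List.slice cs (some (i : Int)) (some s1)] _,
        pvLoopB_acc cs _ [PySem.List.slice cs (some ((i + 1 : Nat) : Int)) (some s1)] _]
      simp [hchunk]

theorem pvMain (cs : List Char) : ∀ (i : Nat) (res : List Char) (comm : List String),
    pvLoopA cs i res comm =
      (res ++ (pvLoopB cs i [] []).1.flatten, comm ++ (pvLoopB cs i [] []).2) := by
  suffices H : ∀ (m i : Nat), cs.length - i ≤ m → ∀ (res : List Char) (comm : List String),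
      pvLoopA cs i res comm =
        (res ++ (pvLoopB cs i [] []).1.flatten, comm ++ (pvLoopB cs i [] []).2) by
    intro i res comm
    exact H _ i le_rfl res comm
  intro m
  induction m with
  | zero =>
    intro i hm res comm
    have hi : cs.length ≤ i := by omega
    rw [pvLoopA.eq_def]
    dsimp only
    rw [dif_neg (by omega), pvBbase cs i hi]
    simp
  | succ m ih =>
    intro i hm res comm
    by_cases hi : i < cs.length
    · rw [pvLoopA.eq_def]
      dsimp only
      rw [dif_pos hi]
      by_cases hc : (i : Int) < (cs.length : Int) - 1 ∧
          PySem.List.slice cs (some (i : Int)) (some ((i : Int) + 2)) = ['/', '*']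
      · -- comment starts at i: B's find lands exactly on i
        have hpref : List.isPrefixOf ['/', '*'] (cs.drop i) := (pvPrefix_iff cs i hi).mp hc
        have hdrop : List.drop i cs = cs[i] :: List.drop (i + 1) cs := List.drop_eq_getElem_cons hi
        have hfind0 : PySem.Chars.find (List.drop i cs) ['/', '*'] = 0 := by
          rw [hdrop, pvFind_cons _ (by simp) _ _, if_pos (by rw [← hdrop]; exact hpref)]
        have hstart : PySem.Chars.findFrom cs ['/', '*'] (i : Int) = (i : Int) := by
          rw [PySem.Chars.findFrom_natCast cs _ i (by omega), hfind0]
          simp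
        have hslice0 : PySem.List.slice cs (some (i : Int)) (some (i : Int)) = [] := by
          rw [PySem.List.slice_toNat cs (by omega) (by omega)]
          simp
        rw [dif_pos hc]
        by_cases he : PySem.Chars.findFrom cs ['*', '/'] ((i : Int) + 2) = -1
        · rw [dif_neg (not_not_intro he)]
          have hB : pvLoopB cs i [] [] = ([[]],
              (PySem.Chars.splitlines (PySem.List.slice cs (some ((i : Int) + 2)))).map
                String.ofList) := by
            rw [pvLoopB.eq_def]
            dsimp only
            rw [dif_neg (by rw [hstart]; omega), hstart, dif_pos he, hslice0]
            simp
          rw [hB]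
          simp
        · rw [dif_pos he]
          have hge := pvFindFrom_ge cs ['*', '/'] ((i : Int) + 2) (by omega) he
          set ep := PySem.Chars.findFrom cs ['*', '/'] ((i : Int) + 2) with hep
          have hB : pvLoopB cs i [] [] = pvLoopB cs (ep.toNat + 2) [[]]
              ((PySem.Chars.splitlines (PySem.List.slice cs (some ((i : Int) + 2))
                (some ep))).map String.ofList) := by
            conv_lhs => rw [pvLoopB.eq_def]
            dsimp only
            rw [dif_neg (by rw [hstart]; omega), hstart, ← hep, dif_neg he, hslice0]
            simp
          have hm' : cs.length - (ep.toNat + 2) ≤ m := by omega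
          rw [ih (ep.toNat + 2) hm', hB, pvLoopB_acc cs (ep.toNat + 2) [[]] _]
          simp
      · rw [dif_neg hc]
        have hnp : ¬ List.isPrefixOf ['/', '*'] (cs.drop i) := by
          intro h
          exact hc ((pvPrefix_iff cs i hi).mpr h)
        have hm' : cs.length - (i + 1) ≤ m := by omega
        rw [ih (i + 1) hm']
        obtain ⟨h1, h2⟩ := pvBstep cs i hi hnp
        rw [h1, h2]
        simp
    · rw [pvLoopA.eq_def]
      dsimp only
      rw [dif_neg hi, pvBbase cs i (by omega)]
      simp

-- ===== VERDICT (by name: the statement is the Claim_ definition above) =====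
theorem extract_block_comments_spec : Claim_equal_extract_block_comments := by
  intro content _
  unfold Spec_extract_block_comments extract_block_comments extract_block_comments_alt
  simp only [pvMain content.toList 0 [] [], pvJoin_nil_flatten]
  simp
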